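-- pv_equiv track=rewrite | github.com/AlexandrTi1984/pythonProject | 000_HomeWork/My_eesti_Kod_Funct.py | chek_key_1_2
-- ===== SOURCE A (Python) =====
-- def chek_key_1_2 (control_number):
--     lst4 = [1, 2, 3, 4, 5, 6, 7, 8, 9, 1]
--     lst5 = [3, 4, 5, 6, 7, 8, 9, 1, 2, 3]
--     sum1 = 0
--     sum2 = 0
--     key1= False
--     key2 = False
--     for i in range(10):
--         sum1 = sum1 + lst4[i] * int(control_number)
--         sum2 = sum2 + lst5[i] * int(control_number)
--     # Если 10 то проверяем на 0.
--     # Проверка на ключ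
--     if sum1 - (sum1 // 11) * 11 == int(control_number):
--         key1=True
--     if sum1 - (sum1 // 11) * 11 == 10 and int(control_number) == 0:
--         key1=True
--     if sum2 - (sum2 // 11) * 11 == int(control_number):
--         key2=True
--     if sum2 - (sum2 // 11) * 11 == 10 and int(control_number) == 0:
--         key2 = True
--     if key1==True and key2==True:
--         return 'Ваш код корректен (проверка прошла по двум проверкам)'
--     if key1==True and key2==False:
--         return 'Ваш код корректен (Первая проверка прошла, вторая - нет)'
--     if key1==False and key2==True:
--         return 'Ваш код корректен (Первая проверка не прошла, вторая - прошла)'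
--     if key1==False and key2==False:
--         return 'Ваш код не корректен (Первая проверка не прошла, вторая - не прошла)'
-- ===== SOURCE B (Python) =====
-- def chek_key_1_2(control_number):
--     # Closed form: the weight lists sum to 46 and 48, so the loop sums are 46*n and 48*n.
--     n = int(control_number)
--     r1 = (46 * n) % 11
--     r2 = (48 * n) % 11
--     key1 = r1 == n or (r1 == 10 and n == 0)
--     key2 = r2 == n or (r2 == 10 and n == 0)
--     if key1:
--         if key2:
--             return 'Ваш код корректен (проверка прошла по двум проверкам)'
--         return 'Ваш код корректен (Первая проверка прошла, вторая - нет)'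
--     if key2:
--         return 'Ваш код корректен (Первая проверка не прошла, вторая - прошла)'
--     return 'Ваш код не корректен (Первая проверка не прошла, вторая - не прошла)'
-- ===== Notes on version B (the rewrite author's own statement) =====
-- stated objective: simpler
-- what changed: B replaces the fixed ten-iteration weighted loop by the closed-form products of the input with the two weight-list totals, and the 'sum minus floordiv times eleven' idiom by a single modulo, branching with nested ifs instead of four flag tests.
import Mathlib
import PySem

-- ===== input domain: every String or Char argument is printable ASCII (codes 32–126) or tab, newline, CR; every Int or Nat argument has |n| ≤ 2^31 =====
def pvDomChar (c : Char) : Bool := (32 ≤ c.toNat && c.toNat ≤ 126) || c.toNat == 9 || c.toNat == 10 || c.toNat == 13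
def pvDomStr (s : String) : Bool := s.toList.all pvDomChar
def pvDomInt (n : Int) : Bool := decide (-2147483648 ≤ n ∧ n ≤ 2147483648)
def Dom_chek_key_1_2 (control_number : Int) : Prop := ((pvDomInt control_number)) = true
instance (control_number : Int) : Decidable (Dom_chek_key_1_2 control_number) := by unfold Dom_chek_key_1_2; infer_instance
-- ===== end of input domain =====

-- B replaces A's 10-step weighted loop by the closed forms 46*n / 48*n and '%' instead of 'sum - sum//11*11' (objective: simpler).

-- ===== PORT A =====
def chek_key_1_2 (control_number : Int) : String :=
  let lst4 : List Int := [1, 2, 3, 4, 5, 6, 7, 8, 9, 1]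
  let lst5 : List Int := [3, 4, 5, 6, 7, 8, 9, 1, 2, 3]
  let s := (PySem.List.pyRange 0 10 1).foldl
    (fun (s : Int × Int) i =>
      (s.1 + PySem.List.pyGetD lst4 i 0 * control_number,
       s.2 + PySem.List.pyGetD lst5 i 0 * control_number)) (0, 0)
  let sum1 := s.1
  let sum2 := s.2
  let key1 := false
  let key2 := false
  let key1 := if sum1 - (PySem.Int.floordiv sum1 11) * 11 = control_number then true else key1
  let key1 := if sum1 - (PySem.Int.floordiv sum1 11) * 11 = 10 ∧ control_number = 0 then true else key1
  let key2 := if sum2 - (PySem.Int.floordiv sum2 11) * 11 = control_number then true else key2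
  let key2 := if sum2 - (PySem.Int.floordiv sum2 11) * 11 = 10 ∧ control_number = 0 then true else key2
  if key1 = true ∧ key2 = true then "Ваш код корректен (проверка прошла по двум проверкам)"
  else if key1 = true ∧ key2 = false then "Ваш код корректен (Первая проверка прошла, вторая - нет)"
  else if key1 = false ∧ key2 = true then "Ваш код корректен (Первая проверка не прошла, вторая - прошла)"
  else "Ваш код не корректен (Первая проверка не прошла, вторая - не прошла)"

-- ===== PORT B =====
def chek_key_1_2_alt (control_number : Int) : String :=
  let n := control_number
  let r1 := PySem.Int.mod (46 * n) 11
  let r2 := PySem.Int.mod (48 * n) 11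
  let key1 := r1 = n ∨ (r1 = 10 ∧ n = 0)
  let key2 := r2 = n ∨ (r2 = 10 ∧ n = 0)
  if key1 then
    if key2 then "Ваш код корректен (проверка прошла по двум проверкам)"
    else "Ваш код корректен (Первая проверка прошла, вторая - нет)"
  else if key2 then "Ваш код корректен (Первая проверка не прошла, вторая - прошла)"
  else "Ваш код не корректен (Первая проверка не прошла, вторая - не прошла)"

-- ===== PRECONDITION & SPEC =====
def Spec_chek_key_1_2 (control_number : Int) (out : String) : Prop := out = chek_key_1_2_alt control_number
instance (control_number : Int) (out : String) : Decidable (Spec_chek_key_1_2 control_number out) := by unfold Spec_chek_key_1_2; infer_instance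

-- ===== CLAIM (what is proved, stated in full; the proofs are below) =====
def Claim_equal_chek_key_1_2 : Prop := ∀ (control_number : Int), Dom_chek_key_1_2 control_number → Spec_chek_key_1_2 control_number (chek_key_1_2 control_number)

-- ===== LEMMAS AND PROOFS =====

-- ===== VERDICT (by name: the statement is the Claim_ definition above) =====
theorem chek_key_1_2_spec : Claim_equal_chek_key_1_2 := by
  intro n _
  unfold Spec_chek_key_1_2 chek_key_1_2 chek_key_1_2_alt
  have hR : PySem.List.pyRange 0 10 1 = [0,1,2,3,4,5,6,7,8,9] := by decide
  rw [hR]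
  have hA0 : PySem.List.pyGetD ([1,2,3,4,5,6,7,8,9,1] : List Int) 0 0 = 1 := by decide
  have hB0 : PySem.List.pyGetD ([3,4,5,6,7,8,9,1,2,3] : List Int) 0 0 = 3 := by decide
  have hA1 : PySem.List.pyGetD ([1,2,3,4,5,6,7,8,9,1] : List Int) 1 0 = 2 := by decide
  have hB1 : PySem.List.pyGetD ([3,4,5,6,7,8,9,1,2,3] : List Int) 1 0 = 4 := by decide
  have hA2 : PySem.List.pyGetD ([1,2,3,4,5,6,7,8,9,1] : List Int) 2 0 = 3 := by decide
  have hB2 : PySem.List.pyGetD ([3,4,5,6,7,8,9,1,2,3] : List Int) 2 0 = 5 := by decide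
  have hA3 : PySem.List.pyGetD ([1,2,3,4,5,6,7,8,9,1] : List Int) 3 0 = 4 := by decide
  have hB3 : PySem.List.pyGetD ([3,4,5,6,7,8,9,1,2,3] : List Int) 3 0 = 6 := by decide
  have hA4 : PySem.List.pyGetD ([1,2,3,4,5,6,7,8,9,1] : List Int) 4 0 = 5 := by decide
  have hB4 : PySem.List.pyGetD ([3,4,5,6,7,8,9,1,2,3] : List Int) 4 0 = 7 := by decide
  have hA5 : PySem.List.pyGetD ([1,2,3,4,5,6,7,8,9,1] : List Int) 5 0 = 6 := by decide
  have hB5 : PySem.List.pyGetD ([3,4,5,6,7,8,9,1,2,3] : List Int) 5 0 = 8 := by decide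
  have hA6 : PySem.List.pyGetD ([1,2,3,4,5,6,7,8,9,1] : List Int) 6 0 = 7 := by decide
  have hB6 : PySem.List.pyGetD ([3,4,5,6,7,8,9,1,2,3] : List Int) 6 0 = 9 := by decide
  have hA7 : PySem.List.pyGetD ([1,2,3,4,5,6,7,8,9,1] : List Int) 7 0 = 8 := by decide
  have hB7 : PySem.List.pyGetD ([3,4,5,6,7,8,9,1,2,3] : List Int) 7 0 = 1 := by decide
  have hA8 : PySem.List.pyGetD ([1,2,3,4,5,6,7,8,9,1] : List Int) 8 0 = 9 := by decide
  have hB8 : PySem.List.pyGetD ([3,4,5,6,7,8,9,1,2,3] : List Int) 8 0 = 2 := by decide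
  have hA9 : PySem.List.pyGetD ([1,2,3,4,5,6,7,8,9,1] : List Int) 9 0 = 1 := by decide
  have hB9 : PySem.List.pyGetD ([3,4,5,6,7,8,9,1,2,3] : List Int) 9 0 = 3 := by decide
  have hmod : ∀ a : Int, a - PySem.Int.floordiv a 11 * 11 = PySem.Int.mod a 11 := by
    intro a; have := PySem.Int.floordiv_mul_add_mod a 11; omega
  simp only [List.foldl, hA0,hA1,hA2,hA3,hA4,hA5,hA6,hA7,hA8,hA9,
    hB0,hB1,hB2,hB3,hB4,hB5,hB6,hB7,hB8,hB9]
  have e1 : (0 + 1*n + 2*n + 3*n + 4*n + 5*n + 6*n + 7*n + 8*n + 9*n + 1*n : Int) = 46*n := by ring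
  have e2 : (0 + 3*n + 4*n + 5*n + 6*n + 7*n + 8*n + 9*n + 1*n + 2*n + 3*n : Int) = 48*n := by ring
  rw [e1, e2]
  simp only [hmod]
  have d1 : ¬(46 * n % 11 = 10 ∧ n = 0) := by rintro ⟨h, rfl⟩; omega
  have d2 : ¬(48 * n % 11 = 10 ∧ n = 0) := by rintro ⟨h, rfl⟩; omega
  by_cases h1 : 46 * n % 11 = n <;> by_cases h2 : 48 * n % 11 = n <;>
    simp [h1, h2, d1, d2]
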